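-- pv_equiv track=rewrite | github.com/halotukozak/PasswordHacker.py | Password Hacker/task/hacking/hack.py | combinations_generator
-- ===== SOURCE A (Python) =====
-- import itertools
--
-- def combinations_generator(case):
--     leet = {33: '!', 34: '"', 35: '#', 36: '$', 37: '%', 38: '&', 39: "'", 40: '(', 41: ')', 42: '*', 43: '+', 44: ',',
--             45: '-', 46: '.', 47: '/', 48: '0', 49: '1', 50: '2', 51: '3', 52: '4', 53: '5', 54: '6', 55: '7', 56: '8',
--             57: '9', 58: ':', 59: ';', 60: '<', 61: '=', 62: '>', 63: '?', 64: '@', 91: '[',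
--             92: '\\', 93: ']', 94: '^', 95: '_', 96: '`', 123: '{', 124: '|', 125: '}', 126: '~',
--             65: "Aa@", 66: "Bb", 67: "Cc", 68: "Dd", 69: 'Ee', 70: 'Ff', 71: 'Gg', 72: 'Hh', 73: 'Ii', 74: 'Jj',
--             75: 'Kk', 76: 'Ll',
--             77: 'Mm', 78: 'Nn', 79: 'Oo0', 80: 'Pp', 81: 'Qq', 82: 'Rr5', 83: 'Ss', 84: 'Tt', 85: 'Uu', 86: 'Vv',
--             87: 'Ww', 88: 'Xx',
--             89: 'Yy', 90: 'Zx'}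
--
--     for letters in itertools.product(*[leet[ord(el.upper())] for el in case]):
--         yield "".join(letters)
-- ===== SOURCE B (Python) =====
-- def combinations_generator(case):
--     # Rule-based options instead of the 70-entry table: a symbol/digit stands only
--     # for itself; a letter stands for its upper+lower pair, with the table's
--     # extra/irregular entries kept as a 4-entry override dict.
--     overrides = {'A': 'Aa@', 'O': 'Oo0', 'R': 'Rr5', 'Z': 'Zx'}
--
--     def options(ch):
--         u = ch.upper()
--         o = ord(u)
--         if 65 <= o <= 90:
--             return overrides.get(u, u + u.lower())
--         if 33 <= o <= 126:
--             return u
--         raise KeyError(o)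
--
--     opts_list = [options(el) for el in case]  # eager, same KeyError timing as A
--
--     def rec(i, prefix):
--         if i == len(opts_list):
--             yield prefix
--         else:
--             for c in opts_list[i]:
--                 yield from rec(i + 1, prefix + c)
--
--     yield from rec(0, "")
-- ===== Notes on version B (the rewrite author's own statement) =====
-- stated objective: alternative
-- what changed: Replaces the 70-entry leet dict by a character-class rule (symbol/digit maps to itself, letter to its upper+lower pair, with a 4-entry override dict for the irregular entries) and the itertools.product call by an explicit recursion over positions extending a prefix.
import Mathlib
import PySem

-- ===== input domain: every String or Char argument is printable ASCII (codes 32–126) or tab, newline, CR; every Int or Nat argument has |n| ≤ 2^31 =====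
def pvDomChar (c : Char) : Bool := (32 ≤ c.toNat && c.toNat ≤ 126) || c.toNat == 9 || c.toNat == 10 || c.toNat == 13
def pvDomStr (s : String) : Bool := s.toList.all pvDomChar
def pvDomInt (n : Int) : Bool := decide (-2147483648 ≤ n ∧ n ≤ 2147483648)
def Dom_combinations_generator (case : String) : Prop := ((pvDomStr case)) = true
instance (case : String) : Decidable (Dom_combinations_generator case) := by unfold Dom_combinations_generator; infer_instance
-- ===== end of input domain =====

-- B replaces the 70-entry dict by a character-class rule (symbol → itself, letter →
-- upper+lower with a 4-entry override table) and itertools.product by a recursion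
-- over positions extending a prefix (objective: alternative, same cost).

-- ===== PORT A =====
-- the leet dict literal of A, as a lookup by code (none = KeyError)
def leetOpts (n : Nat) : Option String :=
  match n with
  | 33 => some "!"
  | 34 => some "\""
  | 35 => some "#"
  | 36 => some "$"
  | 37 => some "%"
  | 38 => some "&"
  | 39 => some "'"
  | 40 => some "("
  | 41 => some ")"
  | 42 => some "*"
  | 43 => some "+"
  | 44 => some ","
  | 45 => some "-"
  | 46 => some "."
  | 47 => some "/"
  | 48 => some "0"
  | 49 => some "1"
  | 50 => some "2"
  | 51 => some "3"
  | 52 => some "4"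
  | 53 => some "5"
  | 54 => some "6"
  | 55 => some "7"
  | 56 => some "8"
  | 57 => some "9"
  | 58 => some ":"
  | 59 => some ";"
  | 60 => some "<"
  | 61 => some "="
  | 62 => some ">"
  | 63 => some "?"
  | 64 => some "@"
  | 91 => some "["
  | 92 => some "\\"
  | 93 => some "]"
  | 94 => some "^"
  | 95 => some "_"
  | 96 => some "`"
  | 123 => some "{"
  | 124 => some "|"
  | 125 => some "}"
  | 126 => some "~"
  | 65 => some "Aa@"
  | 66 => some "Bb"
  | 67 => some "Cc"
  | 68 => some "Dd"
  | 69 => some "Ee"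
  | 70 => some "Ff"
  | 71 => some "Gg"
  | 72 => some "Hh"
  | 73 => some "Ii"
  | 74 => some "Jj"
  | 75 => some "Kk"
  | 76 => some "Ll"
  | 77 => some "Mm"
  | 78 => some "Nn"
  | 79 => some "Oo0"
  | 80 => some "Pp"
  | 81 => some "Qq"
  | 82 => some "Rr5"
  | 83 => some "Ss"
  | 84 => some "Tt"
  | 85 => some "Uu"
  | 86 => some "Vv"
  | 87 => some "Ww"
  | 88 => some "Xx"
  | 89 => some "Yy"
  | 90 => some "Zx"
  | _ => none

-- Python str.upper() on a single ASCII character, as a code transformation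
def pyUpperCode (c : Char) : Nat :=
  if 97 ≤ c.toNat ∧ c.toNat ≤ 122 then c.toNat - 32 else c.toNat

-- A: eager option-list comprehension (none = KeyError, excluded by Pre_; the port
-- returns [] there), then itertools.product transcribed as the standard fold that
-- extends every partial tuple by each character of the next option string, joined.
def combinations_generator (case : String) : List String :=
  match case.toList.mapM (fun el => leetOpts (pyUpperCode el)) with
  | none => []
  | some opts =>
      opts.foldl
        (fun acc s => acc.flatMap (fun p => s.toList.map (fun ch => p ++ String.mk [ch])))
        [""]

-- ===== PORT B =====
-- the 4-entry override dict of B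
def overridesGet (o : Nat) : Option String :=
  if o = 65 then some "Aa@"
  else if o = 79 then some "Oo0"
  else if o = 82 then some "Rr5"
  else if o = 90 then some "Zx"
  else none

-- B's options(ch): the helper ord's its argument at once, so it is ported on the code
-- (u = chr o after upper; u + u.lower() = codes o, o+32); none = the raise KeyError
def bOptionsCode (o0 : Nat) : Option String :=
  let o := if 97 ≤ o0 ∧ o0 ≤ 122 then o0 - 32 else o0   -- ch.upper()
  if 65 ≤ o ∧ o ≤ 90 then
    some ((overridesGet o).getD (String.mk [Char.ofNat o, Char.ofNat (o + 32)]))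
  else if 33 ≤ o ∧ o ≤ 126 then some (String.mk [Char.ofNat o])
  else none

-- B's rec(i, prefix): recursion over the remaining positions, extending the prefix
def altRec (opts : List String) (pref : String) : List String :=
  match opts with
  | [] => [pref]
  | s :: rest => s.toList.flatMap (fun ch => altRec rest (pref ++ String.mk [ch]))

def combinations_generator_alt (case : String) : List String :=
  match case.toList.mapM (fun el => bOptionsCode el.toNat) with
  | none => []
  | some opts => altRec opts ""

-- ===== PRECONDITION & SPEC =====
-- Pre_ excludes exactly the inputs where Python A raises KeyError: within Dom these are
-- the characters space, tab, newline and CR (code < 33), whose code is not a key of the dict.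
def Pre_combinations_generator (case : String) : Prop :=
  (case.toList.all (fun c => 33 ≤ c.toNat)) = true
instance (case : String) : Decidable (Pre_combinations_generator case) := by
  unfold Pre_combinations_generator; infer_instance
def pvWitness_combinations_generator : String := "aZ!"

def Spec_combinations_generator (case : String) (out : List String) : Prop := out = combinations_generator_alt case
instance (case : String) (out : List String) : Decidable (Spec_combinations_generator case out) := by unfold Spec_combinations_generator; infer_instance

-- ===== CLAIM (what is proved, stated in full; the proofs are below) =====
def Claim_equal_combinations_generator : Prop := ∀ (case : String), Dom_combinations_generator case → Pre_combinations_generator case → Spec_combinations_generator case (combinations_generator case)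

-- ===== LEMMAS AND PROOFS =====

-- the two option lookups agree on every code below 127 (127 cases, checked by kernel)
theorem opts_code_eq : ∀ n, n < 127 →
    leetOpts (if 97 ≤ n ∧ n ≤ 122 then n - 32 else n) = bOptionsCode n := by
  decide

theorem opts_char_eq (c : Char) (h : c.toNat < 127) :
    leetOpts (pyUpperCode c) = bOptionsCode c.toNat := by
  have := opts_code_eq c.toNat h
  simpa [pyUpperCode] using this

-- the two eager comprehensions agree on every Dom string
theorem mapM_eq (l : List Char) (hd : l.all pvDomChar = true) :
    l.mapM (fun el => leetOpts (pyUpperCode el)) = l.mapM (fun el => bOptionsCode el.toNat) := by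
  induction l with
  | nil => rfl
  | cons c t ih =>
      simp only [List.all_cons, Bool.and_eq_true] at hd
      have hc : c.toNat < 127 := by
        have := hd.1
        simp only [pvDomChar, Bool.or_eq_true, Bool.and_eq_true, decide_eq_true_eq,
          beq_iff_eq] at this
        omega
      simp [List.mapM_cons, opts_char_eq c hc, ih hd.2]

-- the product fold over any accumulator equals flat-mapping the prefix recursion
theorem foldl_eq_altRec (opts : List String) (acc : List String) :
    opts.foldl
      (fun acc s => acc.flatMap (fun p => s.toList.map (fun ch => p ++ String.mk [ch])))
      acc
    = acc.flatMap (fun p => altRec opts p) := by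
  induction opts generalizing acc with
  | nil => simp [altRec]
  | cons s rest ih =>
      simp [List.foldl_cons, ih, altRec, List.flatMap_assoc, List.flatMap_map]

-- ===== VERDICT (by name: the statement is the Claim_ definition above) =====
theorem combinations_generator_spec : Claim_equal_combinations_generator := by
  intro case hdom _
  unfold Spec_combinations_generator combinations_generator combinations_generator_alt
  rw [mapM_eq case.toList hdom]
  cases h : case.toList.mapM (fun el => bOptionsCode el.toNat) with
  | none => rfl
  | some opts => simp [foldl_eq_altRec]
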